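-- pv_equiv track=rewrite | github.com/MarcS18/Thesis_ESI | Chapter_4_Application/Ullmann_Pyrrolidinone/get_descriptors_nots_pyr.py | check_nu_position
-- ===== SOURCE A (Python) =====
-- def check_nu_position(nu_atom_list, nucleophile):
--     """
--     Find location of the nucleophile in the structure
--     :param nu_atom_list: list of atomic symbols for the compelex
--     :param nucleophile: list of atomic symbols of the nucleophile
--     :return: index of the first atom of the nucelphile in the complex
--     """
--     pip_len = len(nucleophile)
--     for i in range(len(nu_atom_list)-pip_len + 1):
--         if nucleophile == nu_atom_list[i:i + pip_len]:
--             return i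
--         else:
--             pass
--     return None
-- ===== SOURCE B (Python) =====
-- def check_nu_position(nu_atom_list, nucleophile):
--     """Rabin-Karp rolling-hash search for the first occurrence of the
--     nucleophile sublist; every hash hit is verified, so the result is exact."""
--     MOD = 1000000007
--     BASE = 911382323
--
--     def sval(s):
--         v = 0
--         for ch in s:
--             v = (v * 256 + ord(ch)) % MOD
--         return v
--
--     m = len(nucleophile)
--     n = len(nu_atom_list)
--     if m > n:
--         return None
--     hp = 0
--     for s in nucleophile:
--         hp = (hp * BASE + sval(s)) % MOD
--     ht = 0
--     for s in nu_atom_list[:m]: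
--         ht = (ht * BASE + sval(s)) % MOD
--     powm = pow(BASE, m - 1, MOD) if m > 0 else 0
--     for i in range(n - m + 1):
--         if ht == hp and nu_atom_list[i:i + m] == nucleophile:
--             return i
--         if i + m < n:
--             ht = ((ht - sval(nu_atom_list[i]) * powm) * BASE + sval(nu_atom_list[i + m])) % MOD
--     return None
-- ===== Notes on version B (the rewrite author's own statement) =====
-- stated objective: alternative
-- what changed: Replaced A's scan that compares the full slice nu_atom_list[i:i+m] at every position with a Rabin-Karp rolling-hash scan that only compares (and thereby verifies) the slice when the window hash equals the pattern hash.
import Mathlib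
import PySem

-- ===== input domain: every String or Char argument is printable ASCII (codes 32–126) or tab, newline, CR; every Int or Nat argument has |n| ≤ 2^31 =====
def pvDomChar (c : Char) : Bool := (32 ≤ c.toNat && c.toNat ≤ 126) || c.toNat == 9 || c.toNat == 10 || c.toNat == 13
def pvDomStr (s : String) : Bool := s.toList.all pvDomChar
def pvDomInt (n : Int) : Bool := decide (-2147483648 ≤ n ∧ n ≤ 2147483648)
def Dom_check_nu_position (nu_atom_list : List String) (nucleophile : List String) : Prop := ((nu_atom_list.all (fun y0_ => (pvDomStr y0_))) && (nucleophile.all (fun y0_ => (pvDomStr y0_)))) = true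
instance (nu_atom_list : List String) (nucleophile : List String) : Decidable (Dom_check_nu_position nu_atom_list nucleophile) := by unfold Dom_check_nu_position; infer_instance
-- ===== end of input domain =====

-- B replaces A's naive slice-comparison scan by a Rabin-Karp rolling-hash scan whose hash hits
-- are verified, so it returns the identical first index (objective: alternative algorithm).


-- ===== PORT A =====
-- A's 'for i in range(len(nu_atom_list)-pip_len+1): if nucleophile == nu_atom_list[i:i+pip_len]: return i' loop
def aGo (t : List String) (pip_len : Int) (p : List String) : List Int → Option Int
  | [] => none
  | i :: rest =>
    if p = PySem.List.slice t (some i) (some (i + pip_len)) then some i else aGo t pip_len p rest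

def check_nu_position (nu_atom_list : List String) (nucleophile : List String) : Option Int :=
  let pip_len : Int := nucleophile.length
  aGo nu_atom_list pip_len nucleophile
    (PySem.List.pyRange 0 ((nu_atom_list.length : Int) - pip_len + 1) 1)

-- ===== PORT B =====
-- B's sval: hash of one atomic-symbol string
def svalAlt (s : String) : Int :=
  s.toList.foldl (fun v c => (v * 256 + (c.toNat : Int)) % 1000000007) 0

-- B's 'h = (h * BASE + sval(s)) % MOD' fold (used for both hp and the initial ht)
def hfold (l : List String) : Int :=
  l.foldl (fun a s => (a * 911382323 + svalAlt s) % 1000000007) 0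

-- B's 'for i in range(n - m + 1)' loop with early return; fuel k = number of remaining iterations;
-- nu_atom_list[i] / nu_atom_list[i+m] are in range whenever the update branch fires (i + m < n),
-- so pyGetD's default is never consulted
def rkGo (t p : List String) (m : Int) (hp powm : Int) (i ht : Int) (k : Nat) : Option Int :=
  match k with
  | 0 => none
  | Nat.succ k =>
    if ht = hp ∧ PySem.List.slice t (some i) (some (i + m)) = p then some i
    else
      let ht' := if i + m < (t.length : Int) then
          ((ht - svalAlt (PySem.List.pyGetD t i "") * powm) * 911382323
              + svalAlt (PySem.List.pyGetD t (i + m) "")) % 1000000007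
        else ht
      rkGo t p m hp powm (i + 1) ht' k

def check_nu_position_alt (nu_atom_list : List String) (nucleophile : List String) : Option Int :=
  let m : Int := nucleophile.length
  let n : Int := nu_atom_list.length
  if m > n then none
  else
    let hp := hfold nucleophile
    let ht := hfold (PySem.List.slice nu_atom_list none (some m))
    let powm := if m > 0 then PySem.Int.powMod 911382323 (nucleophile.length - 1) 1000000007 else 0
    rkGo nu_atom_list nucleophile m hp powm 0 ht (n - m + 1).toNat

-- ===== PRECONDITION & SPEC =====
def Spec_check_nu_position (nu_atom_list : List String) (nucleophile : List String) (out : Option Int) : Prop := out = check_nu_position_alt nu_atom_list nucleophile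
instance (nu_atom_list : List String) (nucleophile : List String) (out : Option Int) : Decidable (Spec_check_nu_position nu_atom_list nucleophile out) := by unfold Spec_check_nu_position; infer_instance

-- ===== CLAIM (what is proved, stated in full; the proofs are below) =====
def Claim_equal_check_nu_position : Prop := ∀ (nu_atom_list : List String) (nucleophile : List String), Dom_check_nu_position nu_atom_list nucleophile → Spec_check_nu_position nu_atom_list nucleophile (check_nu_position nu_atom_list nucleophile)

-- ===== LEMMAS AND PROOFS =====

-- the exact (un-reduced) polynomial hash underlying hfold
def ehash (l : List String) : Int := l.foldl (fun a s => a * 911382323 + svalAlt s) 0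

theorem ehash_from (l : List String) : ∀ a : Int,
    l.foldl (fun a s => a * 911382323 + svalAlt s) a
      = a * 911382323 ^ l.length + ehash l := by
  induction l with
  | nil => intro a; simp [ehash]
  | cons x xs ih =>
    intro a
    simp only [List.foldl_cons, List.length_cons]
    rw [ih (a * 911382323 + svalAlt x)]
    have h2 : ehash (x :: xs) = (0 * 911382323 + svalAlt x) * 911382323 ^ xs.length + ehash xs := by
      simpa [ehash, List.foldl_cons] using ih (0 * 911382323 + svalAlt x)
    rw [h2]; ring

theorem hfold_from (l : List String) : ∀ a : Int,
    l.foldl (fun a s => (a * 911382323 + svalAlt s) % 1000000007) (a % 1000000007)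
      = (l.foldl (fun a s => a * 911382323 + svalAlt s) a) % 1000000007 := by
  induction l with
  | nil => intro a; rfl
  | cons x xs ih =>
    intro a
    simp only [List.foldl_cons]
    rw [← ih (a * 911382323 + svalAlt x)]
    congr 1
    exact (Int.ModEq.add_right _ (Int.ModEq.mul_right _ (Int.emod_emod_of_dvd a dvd_rfl)))

theorem hfold_eq_ehash_mod (l : List String) : hfold l = ehash l % 1000000007 := by
  have := hfold_from l 0
  simpa [hfold, ehash] using this

theorem ehash_append_singleton (l : List String) (c : String) :
    ehash (l ++ [c]) = ehash l * 911382323 + svalAlt c := by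
  simp [ehash, List.foldl_append]

-- the rolling-hash update is exact modulo MOD
theorem roll_step (x c : String) (ws : List String) (powm : Int)
    (hpow : powm % 1000000007 = (911382323 : Int) ^ ws.length % 1000000007) :
    ((hfold (x :: ws) - svalAlt x * powm) * 911382323 + svalAlt c) % 1000000007
      = hfold (ws ++ [c]) := by
  have e1 : ehash (x :: ws) = svalAlt x * 911382323 ^ ws.length + ehash ws := by
    simpa [ehash, List.foldl_cons] using ehash_from ws (0 * 911382323 + svalAlt x)
  have h1 : Int.ModEq 1000000007 (hfold (x :: ws)) (svalAlt x * 911382323 ^ ws.length + ehash ws) := by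
    rw [hfold_eq_ehash_mod, e1]; exact Int.emod_emod_of_dvd _ dvd_rfl
  have h2 : Int.ModEq 1000000007 powm ((911382323 : Int) ^ ws.length) := hpow
  have h3 := ((h1.sub (h2.mul_left (svalAlt x))).mul_right (911382323 : Int)).add_right (svalAlt c)
  have h4 : (svalAlt x * 911382323 ^ ws.length + ehash ws - svalAlt x * 911382323 ^ ws.length)
        * 911382323 + svalAlt c
      = ehash ws * 911382323 + svalAlt c := by ring
  rw [h4] at h3
  conv_rhs => rw [hfold_eq_ehash_mod, ehash_append_singleton]
  exact h3

-- a window slice in drop/take form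
theorem slice_window (t : List String) (i : Int) (M : Nat) (h : 0 ≤ i) :
    PySem.List.slice t (some i) (some (i + (M : Int))) = (t.drop i.toNat).take M := by
  rw [PySem.List.slice_toNat t h (by omega)]
  congr 1; omega

-- B's scan agrees with A's scan from any position i, given the rolling-hash invariant
theorem main_loop (t p : List String) (powm : Int)
    (hpow : p ≠ [] → powm % 1000000007 = (911382323 : Int) ^ (p.length - 1) % 1000000007) :
    ∀ (k : Nat) (i ht : Int), 0 ≤ i →
    i + (k : Int) = (t.length : Int) - (p.length : Int) + 1 →
    ht = hfold (PySem.List.slice t (some i) (some (i + (p.length : Int)))) →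
    rkGo t p (p.length : Int) (hfold p) powm i ht k
      = aGo t (p.length : Int) p (PySem.List.pyRange i ((t.length : Int) - (p.length : Int) + 1) 1) := by
  intro k
  induction k with
  | zero =>
    intro i ht _ hk _
    rw [PySem.List.pyRange_one_eq_nil (by omega)]
    rfl
  | succ k ih =>
    intro i ht hi hk hht
    rw [PySem.List.pyRange_one_cons (by omega)]
    show (if ht = hfold p ∧ PySem.List.slice t (some i) (some (i + (p.length : Int))) = p then some i
          else _)
        = (if p = PySem.List.slice t (some i) (some (i + (p.length : Int))) then some i else _)
    by_cases hc : p = PySem.List.slice t (some i) (some (i + (p.length : Int)))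
    · rw [if_pos hc, if_pos ⟨by rw [hht, ← hc], hc.symm⟩]
    · rw [if_neg hc, if_neg (fun ⟨_, h2⟩ => hc h2.symm)]
      match k with
      | 0 =>
        rw [PySem.List.pyRange_one_eq_nil (by push_cast at hk ⊢; omega)]
        rfl
      | Nat.succ k' =>
        -- at least two iterations remain, so the update branch fires: i + M < N
        have hiN : i + (p.length : Int) < (t.length : Int) := by push_cast at hk ⊢; omega
        have hM : 1 ≤ p.length := by
          rcases Nat.eq_zero_or_pos p.length with h0 | h1
          · exfalso
            apply hc
            have hp0 : p = [] := List.length_eq_zero_iff.mp h0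
            subst hp0
            simp only [List.length_nil, Nat.cast_zero, add_zero]
            rw [PySem.List.slice_toNat t hi hi]
            simp
          · exact h1
        have hIN : i.toNat < t.length := by omega
        have hIM : i.toNat + p.length < t.length := by omega
        -- window decompositions
        have hw1 : PySem.List.slice t (some i) (some (i + (p.length : Int)))
            = t[i.toNat] :: (t.drop (i.toNat + 1)).take (p.length - 1) := by
          rw [slice_window t i p.length hi, List.drop_eq_getElem_cons hIN]
          rw [show p.length = (p.length - 1) + 1 from by omega]
          rfl
        have hw2 : PySem.List.slice t (some (i + 1)) (some ((i + 1) + (p.length : Int)))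
            = (t.drop (i.toNat + 1)).take (p.length - 1) ++ [t[i.toNat + p.length]] := by
          rw [slice_window t (i + 1) p.length (by omega)]
          rw [show (i + 1).toNat = i.toNat + 1 from by omega]
          calc List.take p.length (List.drop (i.toNat + 1) t)
              = List.take ((p.length - 1) + 1) (List.drop (i.toNat + 1) t) := by
                rw [show p.length - 1 + 1 = p.length from by omega]
            _ = List.take (p.length - 1) (List.drop (i.toNat + 1) t)
                  ++ ((List.drop (i.toNat + 1) t)[p.length - 1]?).toList := List.take_add_one
            _ = _ := by
                rw [List.getElem?_drop,
                  show i.toNat + 1 + (p.length - 1) = i.toNat + p.length from by omega,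
                  List.getElem?_eq_getElem hIM]
                rfl
        have hws : ((t.drop (i.toNat + 1)).take (p.length - 1)).length = p.length - 1 := by
          rw [List.length_take, List.length_drop]; omega
        have hget1 : PySem.List.pyGetD t i "" = t[i.toNat] :=
          PySem.List.pyGetD_eq_getElem t "" hi (by exact_mod_cast (by omega : i < (t.length : Int)))
        have hget2 : PySem.List.pyGetD t (i + (p.length : Int)) "" = t[i.toNat + p.length] := by
          rw [PySem.List.pyGetD_eq_getElem t "" (by omega) (by omega)]
          congr 1; omega
        have hinv : (((ht - svalAlt (PySem.List.pyGetD t i "") * powm) * 911382323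
              + svalAlt (PySem.List.pyGetD t (i + (p.length : Int)) "")) % 1000000007)
            = hfold (PySem.List.slice t (some (i + 1)) (some ((i + 1) + (p.length : Int)))) := by
          rw [hget1, hget2, hw2, hht, hw1]
          exact roll_step _ _ _ powm (by rw [hws]; exact hpow (by intro h; simp [h] at hM))
        show rkGo t p _ _ powm (i + 1)
            (if i + (p.length : Int) < (t.length : Int) then _ else ht) _ = _
        rw [if_pos hiN, hinv]
        exact ih (i + 1) _ (by omega) (by push_cast at hk ⊢; omega) rfl

theorem ab_agree (t p : List String) : check_nu_position t p = check_nu_position_alt t p := by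
  simp only [check_nu_position, check_nu_position_alt]
  by_cases hgt : (p.length : Int) > (t.length : Int)
  · rw [if_pos hgt, PySem.List.pyRange_one_eq_nil (by omega)]
    rfl
  · rw [if_neg hgt]
    rw [← main_loop t p _ ?hpow ((t.length : Int) - (p.length : Int) + 1).toNat 0 _ le_rfl
        (by rw [Int.toNat_of_nonneg (by omega)]; omega)
        (by rw [show PySem.List.slice t (some (0 : Int)) (some (0 + (p.length : Int)))
                  = PySem.List.slice t none (some (p.length : Int)) from by
                rw [zero_add, PySem.List.slice_zero_start]])]
    case hpow =>
      intro hp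
      have hM : (0 : Int) < (p.length : Int) := by
        have h0 : p.length ≠ 0 := fun h => hp (List.length_eq_zero_iff.mp h)
        omega
      rw [if_pos hM]
      unfold PySem.Int.powMod
      rw [PySem.Int.mod_eq_emod_of_pos (by omega)]
      exact Int.emod_emod_of_dvd _ dvd_rfl

-- ===== VERDICT (by name: the statement is the Claim_ definition above) =====
theorem check_nu_position_spec : Claim_equal_check_nu_position := by
  intro t p _
  exact ab_agree t p
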